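-- pv_equiv track=rewrite | github.com/ArneWulff/quantum-mobility-quest-qaims | fvqe_python/ssr_with_fvqe/.ipynb_checkpoints/parameterized_state_perm-checkpoint.py | get_qudit_gates
-- ===== SOURCE A (Python) =====
-- def get_qudit_gates(num_qubits: int) -> list[list[tuple[int,int]]]:
--     """Generates partial swap gates on ply indices for each layer.
--
--     Args:
--         num_qubits (int): Number of qubits in the circuit.
--
--     Returns:
--         list[list[tuple[int, int]]]: A list of layers, each containing pairs of qubits representing qudit gates.
--     """
--     layers = []
--     num_qudits = num_qubits//2
--     for i in range(0,num_qudits//2):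
--         second_qubits = set()
--         layer1 = []
--         layer2 = []
--         for j in range(num_qudits):
--             g = (j, (j+i+1) % num_qudits)
--             if j not in second_qubits:
--                 layer1.append(g)
--                 second_qubits.add(g[1])
--             else:
--                 layer2.append(g)
--         layers.append(layer1)
--         if len(layer2) > 0:
--             layers.append(layer2)
--     # For even number of qubits, last two layers are equivalent
--     return layers[:-1] if num_qubits % 2 == 0 else layers
-- ===== SOURCE B (Python) =====
-- def get_qudit_gates(num_qubits: int) -> list[list[tuple[int,int]]]:
--     layers = []
--     num_qudits = num_qubits // 2
--     for i in range(num_qudits // 2):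
--         d = i + 1
--         layer1 = [(j, (j + d) % num_qudits) for j in range(num_qudits) if (j // d) % 2 == 0]
--         layer2 = [(j, (j + d) % num_qudits) for j in range(num_qudits) if (j // d) % 2 == 1]
--         layers.append(layer1)
--         if layer2:
--             layers.append(layer2)
--     return layers[:-1] if num_qubits % 2 == 0 else layers
-- ===== Notes on version B (the rewrite author's own statement) =====
-- stated objective: simpler
-- what changed: The inner greedy split that threads a second_qubits set through the loop is replaced by the closed-form membership test (j // d) % 2 == 0 (d = i+1), building layer1 and layer2 as two direct comprehensions over j with no sequential state.
import Mathlib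
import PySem

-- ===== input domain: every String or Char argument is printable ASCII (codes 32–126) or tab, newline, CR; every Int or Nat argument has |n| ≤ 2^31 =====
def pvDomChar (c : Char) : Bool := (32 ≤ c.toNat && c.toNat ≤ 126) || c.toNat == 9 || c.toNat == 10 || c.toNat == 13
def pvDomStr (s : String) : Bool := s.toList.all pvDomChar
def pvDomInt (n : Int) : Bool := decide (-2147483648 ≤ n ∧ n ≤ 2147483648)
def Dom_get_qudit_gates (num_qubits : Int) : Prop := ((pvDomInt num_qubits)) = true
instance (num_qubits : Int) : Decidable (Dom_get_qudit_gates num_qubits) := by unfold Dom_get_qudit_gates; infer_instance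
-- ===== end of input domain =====

-- B replaces A's sequential greedy split (a `second_qubits` set threaded through the inner loop)
-- by the closed-form membership test (j // d) % 2 == 0 for layer1; objective: simpler, same cost.

-- ===== PORT A =====
def get_qudit_gates (num_qubits : Int) : List (List (Int × Int)) :=
  let num_qudits := PySem.Int.floordiv num_qubits 2
  let layers := (PySem.List.pyRange 0 (PySem.Int.floordiv num_qudits 2)).foldl
    (fun layers i =>
      let st := (PySem.List.pyRange 0 num_qudits).foldl
        (fun (st : PySem.Set Int × List (Int × Int) × List (Int × Int)) j =>
          let g := (j, PySem.Int.mod (j + i + 1) num_qudits)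
          if !(PySem.Set.contains st.1 j) then
            (PySem.Set.add st.1 g.2, st.2.1 ++ [g], st.2.2)
          else
            (st.1, st.2.1, st.2.2 ++ [g]))
        (PySem.Set.empty, [], [])
      let layers := layers ++ [st.2.1]
      if st.2.2.length > 0 then layers ++ [st.2.2] else layers)
    []
  if PySem.Int.mod num_qubits 2 == 0 then PySem.List.slice layers none (some (-1)) else layers

-- ===== PORT B =====
def get_qudit_gates_alt (num_qubits : Int) : List (List (Int × Int)) :=
  let num_qudits := PySem.Int.floordiv num_qubits 2
  let layers := (PySem.List.pyRange 0 (PySem.Int.floordiv num_qudits 2)).foldl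
    (fun layers i =>
      let d := i + 1
      let layer1 := ((PySem.List.pyRange 0 num_qudits).filter
          (fun j => PySem.Int.mod (PySem.Int.floordiv j d) 2 == 0)).map
          (fun j => (j, PySem.Int.mod (j + d) num_qudits))
      let layer2 := ((PySem.List.pyRange 0 num_qudits).filter
          (fun j => PySem.Int.mod (PySem.Int.floordiv j d) 2 == 1)).map
          (fun j => (j, PySem.Int.mod (j + d) num_qudits))
      let layers := layers ++ [layer1]
      if layer2 ≠ [] then layers ++ [layer2] else layers)
    []
  if PySem.Int.mod num_qubits 2 == 0 then PySem.List.slice layers none (some (-1)) else layers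

-- ===== PRECONDITION & SPEC =====
def Spec_get_qudit_gates (num_qubits : Int) (out : List (List (Int × Int))) : Prop := out = get_qudit_gates_alt num_qubits
instance (num_qubits : Int) (out : List (List (Int × Int))) : Decidable (Spec_get_qudit_gates num_qubits out) := by unfold Spec_get_qudit_gates; infer_instance

-- ===== CLAIM (what is proved, stated in full; the proofs are below) =====
def Claim_equal_get_qudit_gates : Prop := ∀ (num_qubits : Int), Dom_get_qudit_gates num_qubits → Spec_get_qudit_gates num_qubits (get_qudit_gates num_qubits)

-- ===== LEMMAS AND PROOFS =====

-- B's layer-1 membership predicate: (j // d) % 2 == 0.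
def pvEvenBlock (d j : Int) : Bool := PySem.Int.mod (PySem.Int.floordiv j d) 2 == 0

-- the second component of a gate: (j + d) % n
def pvSec (n d j : Int) : Int := PySem.Int.mod (j + d) n

lemma pvSec_eq (n d j : Int) (hd : 0 < d) (hdn : d ≤ n) (hj : 0 ≤ j) (hjn : j < n) :
    pvSec n d j = if j + d < n then j + d else j + d - n := by
  have hn : 0 < n := lt_of_lt_of_le hd hdn
  unfold pvSec
  rw [PySem.Int.mod_eq_emod_of_pos hn]
  split_ifs with h
  · exact Int.emod_eq_of_lt (by omega) h
  · rw [← Int.sub_emod_right (j + d) n]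
    exact Int.emod_eq_of_lt (by omega) (by omega)

-- parity recurrence for B's predicate
lemma pvEvenBlock_small (d j : Int) (hd : 0 < d) (hj : 0 ≤ j) (hjd : j < d) :
    pvEvenBlock d j = true := by
  unfold pvEvenBlock
  have h0 : PySem.Int.floordiv j d = 0 := by
    rw [PySem.Int.floordiv_eq_iff_of_pos hd]; constructor <;> omega
  simp [h0]

lemma pvEvenBlock_shift (d j : Int) (hd : 0 < d) (_hdj : d ≤ j) :
    pvEvenBlock d j = !pvEvenBlock d (j - d) := by
  unfold pvEvenBlock
  have h2 : (0:Int) < 2 := by norm_num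
  rw [PySem.Int.floordiv_eq_ediv_of_pos hd, PySem.Int.floordiv_eq_ediv_of_pos hd,
      PySem.Int.mod_eq_emod_of_pos h2, PySem.Int.mod_eq_emod_of_pos h2]
  have : (j - d) / d = j / d - 1 := by
    have := Int.add_mul_ediv_right j (-1) (show d ≠ 0 by omega)
    simpa [sub_eq_add_neg, neg_mul, one_mul] using this
  rw [this]
  rcases Int.emod_two_eq (j / d) with h | h <;> simp [h, Int.sub_emod]

-- B's layer-2 predicate is the negation of its layer-1 predicate
lemma pvOddPred (d j : Int) :
    (PySem.Int.mod (PySem.Int.floordiv j d) 2 == 1) = !pvEvenBlock d j := by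
  unfold pvEvenBlock
  rw [PySem.Int.mod_eq_emod_of_pos (show (0:Int) < 2 by norm_num)]
  rcases Int.emod_two_eq (PySem.Int.floordiv j d) with h | h <;> simp [h]

-- sec is injective on [0, n)
lemma pvSec_inj (n d j k : Int) (hd : 0 < d) (hdn : d ≤ n)
    (hj : 0 ≤ j) (hjn : j < n) (hk : 0 ≤ k) (hkn : k < n)
    (h : pvSec n d j = pvSec n d k) : j = k := by
  rw [pvSec_eq n d j hd hdn hj hjn, pvSec_eq n d k hd hdn hk hkn] at h
  split_ifs at h <;> omega

-- the inner-loop invariant: after folding the first m values of range(n), A's state is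
-- (the set of produced second components, B's layer1 prefix, B's layer2 prefix)
lemma pvInner (n i : Int) (hi : 0 ≤ i) (hdn : 2 * (i + 1) ≤ n) :
    ∀ (m : Nat), (m : Int) ≤ n →
    ((PySem.List.pyRange 0 (m : Int)).foldl
        (fun (st : PySem.Set Int × List (Int × Int) × List (Int × Int)) j =>
          let g := (j, PySem.Int.mod (j + i + 1) n)
          if !(PySem.Set.contains st.1 j) then
            (PySem.Set.add st.1 g.2, st.2.1 ++ [g], st.2.2)
          else
            (st.1, st.2.1, st.2.2 ++ [g]))
        (PySem.Set.empty, [], []))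
      = (((PySem.List.pyRange 0 (m : Int)).filter (pvEvenBlock (i + 1))).map (pvSec n (i + 1)),
         ((PySem.List.pyRange 0 (m : Int)).filter (pvEvenBlock (i + 1))).map
           (fun j => (j, PySem.Int.mod (j + (i + 1)) n)),
         ((PySem.List.pyRange 0 (m : Int)).filter (fun j => !pvEvenBlock (i + 1) j)).map
           (fun j => (j, PySem.Int.mod (j + (i + 1)) n))) := by
  have hd : (0:Int) < i + 1 := by omega
  have hdn : i + 1 ≤ n := by omega
  intro m
  induction m with
  | zero => simp [pysem, PySem.Set.empty]
  | succ m ih =>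
    intro hm1
    have hm : (m : Int) ≤ n := by push_cast at hm1; omega
    have hmn : (m : Int) < n := by push_cast at hm1; omega
    have hm0 : (0:Int) ≤ (m:Int) := by positivity
    have hrange : PySem.List.pyRange 0 ((m+1 : Nat) : Int)
        = PySem.List.pyRange 0 (m:Int) ++ [(m:Int)] := by
      push_cast
      exact PySem.List.pyRange_one_succ_right hm0
    have hadd : ∀ j : Int, j + i + 1 = j + (i + 1) := by intro j; ring
    -- membership of m in the set of produced second components
    have hiff : ((m:Int) ∈ ((PySem.List.pyRange 0 (m : Int)).filter
        (pvEvenBlock (i + 1))).map (pvSec n (i + 1)))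
        ↔ pvEvenBlock (i + 1) (m:Int) = false := by
      constructor
      · intro hmem
        obtain ⟨k, hk, hsec⟩ := List.mem_map.1 hmem
        rw [List.mem_filter] at hk
        obtain ⟨hkr, hkeven⟩ := hk
        rw [PySem.List.mem_pyRange_one] at hkr
        rw [pvSec_eq n (i+1) k hd hdn hkr.1 (by omega)] at hsec
        split_ifs at hsec with h
        · have hdm : i + 1 ≤ (m:Int) := by omega
          rw [pvEvenBlock_shift (i+1) (m:Int) hd hdm,
              show (m:Int) - (i+1) = k by omega, hkeven]
          rfl
        · omega
      · intro hfalse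
        have hdm : i + 1 ≤ (m:Int) := by
          by_contra hlt
          rw [pvEvenBlock_small (i+1) (m:Int) hd hm0 (by omega)] at hfalse
          exact Bool.true_eq_false.mp hfalse
        refine List.mem_map.2 ⟨(m:Int) - (i+1), List.mem_filter.2
          ⟨PySem.List.mem_pyRange_one.2 ⟨by omega, by omega⟩, ?_⟩, ?_⟩
        · have := pvEvenBlock_shift (i+1) (m:Int) hd hdm
          rw [hfalse] at this
          cases hEB : pvEvenBlock (i+1) ((m:Int) - (i+1))
          · rw [hEB] at this; exact absurd this.symm (by decide)
          · rfl
        · rw [pvSec_eq n (i+1) ((m:Int) - (i+1)) hd hdn (by omega) (by omega)]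
          rw [if_pos (by omega)]
          omega
    have hcont : PySem.Set.contains (((PySem.List.pyRange 0 (m : Int)).filter
        (pvEvenBlock (i + 1))).map (pvSec n (i + 1))) (m:Int)
        = !(pvEvenBlock (i + 1) (m:Int)) := by
      have hdec : PySem.Set.contains (((PySem.List.pyRange 0 (m : Int)).filter
          (pvEvenBlock (i + 1))).map (pvSec n (i + 1))) (m:Int)
          = decide ((m:Int) ∈ ((PySem.List.pyRange 0 (m : Int)).filter
          (pvEvenBlock (i + 1))).map (pvSec n (i + 1))) := by
        simp [PySem.Set.contains]
      cases hEB : pvEvenBlock (i+1) (m:Int)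
      · rw [hdec]; simp [hiff, hEB]
      · rw [hdec]; simp [hiff, hEB]
    rw [hrange, List.foldl_append, ih hm]
    simp only [List.foldl_cons, List.foldl_nil, List.filter_append, List.map_append,
      List.filter_cons, List.filter_nil]
    cases hEB : pvEvenBlock (i+1) (m:Int)
    · -- m goes to layer2
      rw [hEB] at hcont
      simp only [hcont, Bool.not_false, Bool.not_true, if_neg (by decide : ¬ (false = true))]
      simp [hadd]
    · -- m goes to layer1; the new second component is fresh, so Set.add appends it
      rw [hEB] at hcont
      have hnotmem : (pvSec n (i+1) (m:Int)) ∉ ((PySem.List.pyRange 0 (m : Int)).filter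
          (pvEvenBlock (i + 1))).map (pvSec n (i + 1)) := by
        intro hmem
        obtain ⟨k, hk, hsec⟩ := List.mem_map.1 hmem
        rw [List.mem_filter, PySem.List.mem_pyRange_one] at hk
        have := pvSec_inj n (i+1) k (m:Int) hd hdn hk.1.1 (by omega) hm0 hmn hsec
        omega
      have haddS : PySem.Set.add (((PySem.List.pyRange 0 (m : Int)).filter
          (pvEvenBlock (i + 1))).map (pvSec n (i + 1))) (PySem.Int.mod ((m:Int) + i + 1) n)
          = (((PySem.List.pyRange 0 (m : Int)).filter
          (pvEvenBlock (i + 1))).map (pvSec n (i + 1))) ++ [pvSec n (i+1) (m:Int)] := by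
        unfold PySem.Set.add
        rw [if_neg]
        · rw [show ((m:Int) + i + 1) = (m:Int) + (i+1) from hadd (m:Int)]
          rfl
        · rw [show ((m:Int) + i + 1) = (m:Int) + (i+1) from hadd (m:Int)]
          simp only [PySem.Set.contains]
          simp only [List.contains_iff_mem]
          exact hnotmem
      simp only [hcont]
      simp [hadd]
      rw [show ((m:Int) + (i+1)) = (m:Int) + i + 1 from (hadd _).symm]
      exact haddS

-- ===== VERDICT (by name: the statement is the Claim_ definition above) =====
theorem get_qudit_gates_spec : Claim_equal_get_qudit_gates := by
  intro num_qubits _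
  unfold Spec_get_qudit_gates get_qudit_gates get_qudit_gates_alt
  dsimp only
  have hfold : ∀ (n : Int),
      (PySem.List.pyRange 0 (PySem.Int.floordiv n 2)).foldl
        (fun layers i =>
          let st := (PySem.List.pyRange 0 n).foldl
            (fun (st : PySem.Set Int × List (Int × Int) × List (Int × Int)) j =>
              let g := (j, PySem.Int.mod (j + i + 1) n)
              if !(PySem.Set.contains st.1 j) then
                (PySem.Set.add st.1 g.2, st.2.1 ++ [g], st.2.2)
              else
                (st.1, st.2.1, st.2.2 ++ [g]))
            (PySem.Set.empty, [], [])
          let layers := layers ++ [st.2.1]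
          if st.2.2.length > 0 then layers ++ [st.2.2] else layers)
        ([] : List (List (Int × Int)))
      = (PySem.List.pyRange 0 (PySem.Int.floordiv n 2)).foldl
        (fun layers i =>
          let d := i + 1
          let layer1 := ((PySem.List.pyRange 0 n).filter
              (fun j => PySem.Int.mod (PySem.Int.floordiv j d) 2 == 0)).map
              (fun j => (j, PySem.Int.mod (j + d) n))
          let layer2 := ((PySem.List.pyRange 0 n).filter
              (fun j => PySem.Int.mod (PySem.Int.floordiv j d) 2 == 1)).map
              (fun j => (j, PySem.Int.mod (j + d) n))
          let layers := layers ++ [layer1]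
          if layer2 ≠ [] then layers ++ [layer2] else layers)
        ([] : List (List (Int × Int))) := by
    intro n
    apply PySem.List.foldl_congr_mem
    intro acc x hx
    rw [PySem.List.mem_pyRange_one] at hx
    have hx0 : 0 ≤ x := hx.1
    have h2 : 2 * (x + 1) ≤ n := by
      have := (PySem.Int.le_floordiv_iff_mul_le (a := n) (q := x + 1)
        (show (0:Int) < 2 by norm_num)).1 (by omega)
      omega
    have hn0 : 0 ≤ n := by omega
    have hcast : ((n.toNat : Nat) : Int) = n := Int.toNat_of_nonneg hn0
    dsimp only
    rw [show PySem.List.pyRange 0 n = PySem.List.pyRange 0 ((n.toNat : Nat) : Int) by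
          rw [hcast],
        pvInner n x hx0 h2 n.toNat (by omega), hcast]
    rw [List.filter_congr (fun j _ => pvOddPred (x + 1) j)]
    rw [show ((PySem.List.pyRange 0 n).filter
          (fun j => PySem.Int.mod (PySem.Int.floordiv j (x + 1)) 2 == 0))
        = (PySem.List.pyRange 0 n).filter (pvEvenBlock (x + 1)) from
      List.filter_congr (fun j _ => rfl)]
    rcases hL : ((PySem.List.pyRange 0 n).filter
        (fun j => !pvEvenBlock (x + 1) j)).map
        (fun j => (j, PySem.Int.mod (j + (x + 1)) n)) with _ | ⟨a, t⟩ <;> simp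
  rw [hfold]
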